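-- pv_equiv track=rewrite | github.com/PA3BUTUE/LABS | ComplexTermHighlighter/data_loader.py | label_tokens
-- ===== SOURCE A (Python) =====
-- def label_tokens(tokens: list[str], complex_terms_list: list[str]) -> list[int]:
--     """
--     Labels tokens based on a list of complex terms using exact matching.
--
--     # For Russian, simple exact matching is often insufficient due to morphology (word inflections).
--     # Consider using lemmatization on both tokens and complex_terms_list before matching,
--     # or employ embedding-based similarity for more robust matching.
--
--     Args:
--         tokens (list[str]): A list of tokens.
--         complex_terms_list (list[str]): A list of known complex terms.
--
--     Returns:
--         list[int]: A list of labels (0 or 1) corresponding to each input token.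
--                    1 if the token is part of a complex term, 0 otherwise.
--     """
--     labels = [0] * len(tokens)
--     num_tokens = len(tokens)
--     normalized_complex_terms = [term.lower() for term in complex_terms_list]
--
--     for i in range(num_tokens):
--         # Check for multi-word complex terms
--         for term in normalized_complex_terms:
--             term_tokens = term.split()
--             term_len = len(term_tokens)
--             if i + term_len <= num_tokens:
--                 # Extract a slice of tokens from the main list
--                 token_slice = [token.lower() for token in tokens[i:i + term_len]]
--                 # Join the slice into a string to compare with the complex term
--                 # This handles cases where complex terms might have internal punctuation in some tokenizers
--                 # but here we assume complex_terms_list are pre-split if needed.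
--                 # For simple exact match, we compare lists of tokens.
--                 if token_slice == term_tokens:
--                     for j in range(term_len):
--                         labels[i + j] = 1
--                     # Skip ahead by term_len -1 because these tokens are now labeled.
--                     # The outer loop will increment by 1.
--                     # This simple approach might need refinement for overlapping terms.
--                     # For now, the first match wins.
--                     # Consider i += term_len -1 if we want to avoid re-checking sub-parts of matched terms.
--                     # However, this could miss overlapping terms.
--                     # Current logic: if "A B C" is complex, and tokens are A B C D,
--                     # A, B, C get 1. Then check starts from B, then C, then D.
--                     # This is acceptable for a basic version.
--
--     return labels
-- ===== SOURCE B (Python) =====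
-- def label_tokens(tokens: list[str], complex_terms_list: list[str]) -> list[int]:
--     # Term-major with a positions index: lowercase tokens once, index token positions
--     # by token text, then for each DISTINCT normalized term test only the positions
--     # where its first word occurs; covered positions are collected in a set and the
--     # labels are built at the end.
--     low = [t.lower() for t in tokens]
--     n = len(low)
--     pos = {}
--     for i, w in enumerate(low):
--         pos.setdefault(w, []).append(i)
--     covered = set()
--     for term in set(t.lower() for t in complex_terms_list):
--         tt = term.split()
--         if not tt:
--             continue
--         L = len(tt)
--         for i in pos.get(tt[0], []):
--             if i + L <= n and low[i:i+L] == tt: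
--                 covered.update(range(i, i + L))
--     return [1 if k in covered else 0 for k in range(n)]
-- ===== Notes on version B (the rewrite author's own statement) =====
-- stated objective: faster
-- what changed: Token-major nested rescans with in-place label writes are replaced by: lowercase tokens once, build a token->positions dict and the set of distinct normalized terms, then for each distinct term test only the positions where its first word occurs, collecting covered indices in a set and emitting labels in one final comprehension.
import Mathlib
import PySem

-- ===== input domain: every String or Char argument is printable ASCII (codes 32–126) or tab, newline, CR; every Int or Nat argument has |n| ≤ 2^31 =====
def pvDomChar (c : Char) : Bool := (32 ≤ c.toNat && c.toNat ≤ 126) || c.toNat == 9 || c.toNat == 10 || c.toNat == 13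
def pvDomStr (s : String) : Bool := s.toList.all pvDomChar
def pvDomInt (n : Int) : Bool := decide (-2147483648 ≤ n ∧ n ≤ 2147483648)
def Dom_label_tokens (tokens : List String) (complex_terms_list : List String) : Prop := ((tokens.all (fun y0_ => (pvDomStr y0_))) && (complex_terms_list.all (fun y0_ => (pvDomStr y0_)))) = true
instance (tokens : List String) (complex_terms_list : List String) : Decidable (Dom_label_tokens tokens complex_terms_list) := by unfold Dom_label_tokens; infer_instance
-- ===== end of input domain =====

-- B replaces A's token-major nested rescans by a term-major pass over a precomputed
-- token→positions index, collecting covered positions in a set (measured faster in a timing run).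

-- ===== PORT A =====
def label_tokens (tokens : List String) (complex_terms_list : List String) : List Int :=
  let labels : List Int := List.replicate tokens.length 0
  let num_tokens := tokens.length
  let normalized_complex_terms := complex_terms_list.map PySem.Str.lower
  (PySem.List.pyRange 0 (num_tokens : Int)).foldl (fun labels i =>
    normalized_complex_terms.foldl (fun labels term =>
      let term_tokens := PySem.Str.split₀ term
      let term_len := term_tokens.length
      if i + (term_len : Int) ≤ (num_tokens : Int) then
        let token_slice := (PySem.List.slice tokens (some i) (some (i + (term_len : Int)))).map PySem.Str.lower
        if token_slice = term_tokens then
          (PySem.List.pyRange 0 (term_len : Int)).foldl (fun labels j => labels.set (i + j).toNat 1) labels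
        else labels
      else labels) labels) labels


-- ===== PORT B =====
def label_tokens_alt (tokens : List String) (complex_terms_list : List String) : List Int :=
  let low := tokens.map PySem.Str.lower
  let n := low.length
  let pos : PySem.Dict String (List Int) :=
    (PySem.List.enumerate low 0).foldl
      (fun d p => d.modify p.2 [] (fun l => l ++ [p.1])) PySem.Dict.empty  -- pos.setdefault(w, []).append(i) = d[w] = d.get(w, []) ++ [i]
  let covered : PySem.Set Int :=
    (PySem.Set.ofList (complex_terms_list.map PySem.Str.lower)).foldl (fun s term =>
      match PySem.Str.split₀ term with
      | [] => s
      | w :: rest =>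
        let L := (w :: rest).length
        (pos.getD w []).foldl (fun s i =>
          if i + (L : Int) ≤ (n : Int) ∧
              PySem.List.slice low (some i) (some (i + (L : Int))) = w :: rest then
            PySem.Set.update s (PySem.List.pyRange i (i + (L : Int)))
          else s) s) ([] : PySem.Set Int)
  (PySem.List.pyRange 0 (n : Int)).map (fun k => if k ∈ covered then (1 : Int) else 0)


-- ===== PRECONDITION & SPEC =====
def Spec_label_tokens (tokens : List String) (complex_terms_list : List String) (out : List Int) : Prop := out = label_tokens_alt tokens complex_terms_list
instance (tokens : List String) (complex_terms_list : List String) (out : List Int) : Decidable (Spec_label_tokens tokens complex_terms_list out) := by unfold Spec_label_tokens; infer_instance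

-- ===== CLAIM (what is proved, stated in full; the proofs are below) =====
def Claim_equal_label_tokens : Prop := ∀ (tokens : List String) (complex_terms_list : List String), Dom_label_tokens tokens complex_terms_list → Spec_label_tokens tokens complex_terms_list (label_tokens tokens complex_terms_list)

-- ===== LEMMAS AND PROOFS =====

def setr (lab : List Int) (i L : Nat) : List Int :=
  (List.range L).foldl (fun lab j => lab.set (i + j) 1) lab

def pairsA (n : Nat) (norm : List String) : List (Nat × String) :=
  (List.range n).flatMap (fun i => norm.map (fun t => (i, t)))

def PA (n : Nat) (low : List String) (p : Nat × String) : Bool :=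
  decide (p.1 + (PySem.Str.split₀ p.2).length ≤ n) &&
    decide ((low.drop p.1).take (PySem.Str.split₀ p.2).length = PySem.Str.split₀ p.2)

theorem foldl_foldl_flat {α β γ : Type} (xs : List α) (ys : List β) (g : γ → α → β → γ) (init : γ) :
    xs.foldl (fun a x => ys.foldl (fun a y => g a x y) a) init =
      (xs.flatMap (fun x => ys.map (fun y => (x, y)))).foldl (fun a p => g a p.1 p.2) init := by
  induction xs generalizing init with
  | nil => rfl
  | cons x xs ih =>
    simp only [List.foldl_cons, List.flatMap_cons, List.foldl_append, List.foldl_map, ih]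

theorem A_eq (tokens terms : List String) :
    label_tokens tokens terms =
      (pairsA tokens.length (terms.map PySem.Str.lower)).foldl
        (fun lab p => if PA tokens.length (tokens.map PySem.Str.lower) p
          then setr lab p.1 (PySem.Str.split₀ p.2).length else lab)
        (List.replicate tokens.length 0) := by
  simp only [label_tokens]
  rw [PySem.List.pyRange_zero_nat, List.foldl_map, foldl_foldl_flat]
  rw [show ((List.range tokens.length).flatMap
        (fun x => (terms.map PySem.Str.lower).map (fun y => (x, y)))) =
      pairsA tokens.length (terms.map PySem.Str.lower) from rfl]
  apply PySem.List.foldl_congr_mem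
  intro lab p _
  rcases p with ⟨i, term⟩
  simp only
  have hslice : (PySem.List.slice tokens (some (i : Int))
      (some ((i : Int) + ((PySem.Str.split₀ term).length : Int)))).map PySem.Str.lower
      = ((tokens.map PySem.Str.lower).drop i).take (PySem.Str.split₀ term).length := by
    rw [PySem.List.slice_natCast_add]
    rw [List.map_take, List.map_drop]
  have hcond : ((i : Int) + ((PySem.Str.split₀ term).length : Int) ≤ (tokens.length : Int)) ↔
      (i + (PySem.Str.split₀ term).length ≤ tokens.length) := by
    constructor <;> intro h <;> omega
  have hfold : ∀ lab : List Int,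
      (PySem.List.pyRange 0 ((PySem.Str.split₀ term).length : Int)).foldl
        (fun lab j => lab.set ((i : Int) + j).toNat 1) lab
      = setr lab i (PySem.Str.split₀ term).length := by
    intro lab
    rw [PySem.List.pyRange_zero_nat, List.foldl_map, setr]
    apply PySem.List.foldl_congr_mem
    intro acc j _
    have h : ((i : Int) + (j : Int)).toNat = i + j := by omega
    rw [h]
  rw [hslice]
  simp only [hcond, PA, Bool.and_eq_true, decide_eq_true_eq]
  split_ifs <;> first | rfl | (exact hfold lab) | tauto

def hit (low : List String) (terms : List String) (k : Nat) : Bool :=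
  terms.any fun term =>
    (List.range low.length).any fun i =>
      PA low.length low (i, PySem.Str.lower term) && decide (i ≤ k) &&
        decide (k < i + (PySem.Str.split₀ (PySem.Str.lower term)).length)

theorem setr_length (lab : List Int) (i L : Nat) : (setr lab i L).length = lab.length := by
  induction L generalizing lab with
  | zero => simp [setr]
  | succ L ih =>
    simp only [setr, List.range_succ, List.foldl_append, List.foldl_cons, List.foldl_nil]
    rw [show (List.range L).foldl (fun lab j => lab.set (i + j) 1) lab = setr lab i L from rfl]
    simp only [List.length_set]
    exact ih lab

theorem setr_getElem? (lab : List Int) (i L k : Nat) :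
    (setr lab i L)[k]? = if i ≤ k ∧ k < i + L then lab[k]?.map (fun _ => (1 : Int)) else lab[k]? := by
  induction L generalizing lab with
  | zero => simp [setr]
  | succ L ih =>
    simp only [setr, List.range_succ, List.foldl_append, List.foldl_cons, List.foldl_nil]
    rw [show (List.range L).foldl (fun lab j => lab.set (i + j) 1) lab = setr lab i L from rfl]
    rw [List.getElem?_set]
    by_cases hk : i + L = k
    · rw [if_pos hk, setr_length]
      subst hk
      by_cases hin : i + L < lab.length
      · rw [if_pos hin, if_pos (by omega)]
        rw [(List.getElem?_eq_getElem hin : lab[i+L]? = some lab[i+L])]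
        rfl
      · rw [if_neg hin, if_pos (by omega)]
        rw [List.getElem?_eq_none_iff.2 (by omega)]
        rfl
    · rw [if_neg hk, ih]
      by_cases h1 : i ≤ k ∧ k < i + L
      · rw [if_pos h1, if_pos (by omega)]
      · rw [if_neg h1, if_neg (by omega)]

theorem foldl_condwrite {σ : Type} (xs : List σ) (P : σ → Bool)
    (s l : σ → Nat) (lab : List Int) (k : Nat) :
    ((xs.foldl (fun lab x => if P x then setr lab (s x) (l x) else lab) lab))[k]? =
      if ∃ x ∈ xs, P x = true ∧ s x ≤ k ∧ k < s x + l x then lab[k]?.map (fun _ => (1 : Int))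
      else lab[k]? := by
  induction xs generalizing lab with
  | nil => simp
  | cons x xs ih =>
    simp only [List.foldl_cons]
    rw [ih]
    by_cases hx : P x = true
    · by_cases hc : s x ≤ k ∧ k < s x + l x
      · rw [if_pos (⟨x, by simp, hx, hc⟩ : ∃ y ∈ x :: xs, P y = true ∧ s y ≤ k ∧ k < s y + l y)]
        by_cases ht : ∃ y ∈ xs, P y = true ∧ s y ≤ k ∧ k < s y + l y
        · rw [if_pos ht, if_pos hx, setr_getElem?, if_pos hc]
          cases lab[k]? <;> simp
        · rw [if_neg ht, if_pos hx, setr_getElem?, if_pos hc]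
      · by_cases ht : ∃ y ∈ xs, P y = true ∧ s y ≤ k ∧ k < s y + l y
        · rw [if_pos ht, if_pos (by obtain ⟨y, hy, h⟩ := ht; exact ⟨y, by simp [hy], h⟩ :
            ∃ y ∈ x :: xs, P y = true ∧ s y ≤ k ∧ k < s y + l y)]
          rw [if_pos hx, setr_getElem?, if_neg hc]
        · rw [if_neg ht, if_pos hx, setr_getElem?, if_neg hc]
          rw [if_neg (by
            rintro ⟨y, hy, h⟩
            rcases List.mem_cons.1 hy with rfl | hy
            · exact hc h.2
            · exact ht ⟨y, hy, h⟩)]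
    · rw [if_neg hx]
      by_cases ht : ∃ y ∈ xs, P y = true ∧ s y ≤ k ∧ k < s y + l y
      · rw [if_pos ht, if_pos (by obtain ⟨y, hy, h⟩ := ht; exact ⟨y, by simp [hy], h⟩ :
          ∃ y ∈ x :: xs, P y = true ∧ s y ≤ k ∧ k < s y + l y)]
      · rw [if_neg ht, if_neg (by
          rintro ⟨y, hy, h⟩
          rcases List.mem_cons.1 hy with rfl | hy
          · exact hx h.1
          · exact ht ⟨y, hy, h⟩)]

theorem foldl_condwrite_length {σ : Type} (xs : List σ) (P : σ → Bool)
    (s l : σ → Nat) (lab : List Int) :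
    ((xs.foldl (fun lab x => if P x then setr lab (s x) (l x) else lab) lab)).length = lab.length := by
  induction xs generalizing lab with
  | nil => rfl
  | cons x xs ih =>
    simp only [List.foldl_cons]
    rw [ih]
    by_cases hx : P x = true
    · rw [if_pos hx, setr_length]
    · rw [if_neg hx]

theorem pairs_exists_iff (tokens terms : List String) (k : Nat) :
    (∃ p ∈ pairsA tokens.length (terms.map PySem.Str.lower),
        PA tokens.length (tokens.map PySem.Str.lower) p = true ∧
        p.1 ≤ k ∧ k < p.1 + (PySem.Str.split₀ p.2).length) ↔
      hit (tokens.map PySem.Str.lower) terms k = true := by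
  constructor
  · rintro ⟨p, hp, hPA, h1, h2⟩
    obtain ⟨i, hi, hp2⟩ := List.mem_flatMap.1 hp
    obtain ⟨t, ht, rfl⟩ := List.mem_map.1 hp2
    obtain ⟨a, ha, rfl⟩ := List.mem_map.1 ht
    simp only [hit, List.any_eq_true, Bool.and_eq_true, decide_eq_true_eq, List.mem_range,
      List.length_map]
    exact ⟨a, ha, i, List.mem_range.1 hi, ⟨hPA, h1⟩, h2⟩
  · simp only [hit, List.any_eq_true, Bool.and_eq_true, decide_eq_true_eq, List.mem_range,
      List.length_map]
    rintro ⟨a, ha, i, hi, ⟨hPA, h1⟩, h2⟩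
    exact ⟨(i, PySem.Str.lower a),
      List.mem_flatMap.2 ⟨i, List.mem_range.2 hi,
        List.mem_map.2 ⟨PySem.Str.lower a, List.mem_map.2 ⟨a, ha, rfl⟩, rfl⟩⟩, hPA, h1, h2⟩

theorem label_tokens_length (tokens terms : List String) :
    (label_tokens tokens terms).length = tokens.length := by
  rw [A_eq, foldl_condwrite_length, List.length_replicate]

theorem label_tokens_getElem? (tokens terms : List String) (k : Nat) (hk : k < tokens.length) :
    (label_tokens tokens terms)[k]? =
      if hit (tokens.map PySem.Str.lower) terms k then some 1 else some 0 := by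
  rw [A_eq, foldl_condwrite]
  by_cases h : hit (tokens.map PySem.Str.lower) terms k = true
  · rw [if_pos ((pairs_exists_iff tokens terms k).2 h), if_pos h]
    simp [hk]
  · rw [if_neg (fun hc => h ((pairs_exists_iff tokens terms k).1 hc)), if_neg h]
    simp [hk]

def posD (low : List String) : PySem.Dict String (List Int) :=
  (PySem.List.enumerate low 0).foldl
    (fun d p => d.modify p.2 [] (fun l => l ++ [p.1])) PySem.Dict.empty  -- pos.setdefault(w, []).append(i) = d[w] = d.get(w, []) ++ [i]

def stepB (low : List String) (s : PySem.Set Int) (term : String) : PySem.Set Int :=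
  match PySem.Str.split₀ term with
  | [] => s
  | w :: rest =>
    let L := (w :: rest).length
    ((posD low).getD w []).foldl (fun s i =>
      if i + (L : Int) ≤ (low.length : Int) ∧
          PySem.List.slice low (some i) (some (i + (L : Int))) = w :: rest then
        PySem.Set.update s (PySem.List.pyRange i (i + (L : Int)))
      else s) s

def coveredSet (low terms : List String) : PySem.Set Int := terms.foldl (stepB low) []

theorem alt_eq (tokens terms : List String) :
    label_tokens_alt tokens terms =
      (PySem.List.pyRange 0 ((tokens.map PySem.Str.lower).length : Int)).map
        (fun k => if k ∈ coveredSet (tokens.map PySem.Str.lower)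
          (PySem.Set.ofList (terms.map PySem.Str.lower)) then (1 : Int) else 0) := rfl

theorem mem_foldl_step {α : Type} (l : List α) (step : PySem.Set Int → α → PySem.Set Int)
    (C : α → Int → Prop) (h : ∀ s t k, k ∈ step s t ↔ k ∈ s ∨ C t k) :
    ∀ (s : PySem.Set Int) (k : Int), k ∈ l.foldl step s ↔ k ∈ s ∨ ∃ t ∈ l, C t k := by
  induction l with
  | nil => simp
  | cons x xs ih =>
    intro s k
    simp only [List.foldl_cons]
    rw [ih, h]
    constructor
    · rintro (⟨hs | hx⟩ | ⟨t, ht, hc⟩)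
      · exact Or.inl hs
      · exact Or.inr ⟨x, by simp, hx⟩
      · exact Or.inr ⟨t, by simp [ht], hc⟩
    · rintro (hs | ⟨t, ht, hc⟩)
      · exact Or.inl (Or.inl hs)
      · rcases List.mem_cons.1 ht with rfl | ht
        · exact Or.inl (Or.inr hc)
        · exact Or.inr ⟨t, ht, hc⟩

theorem mem_posD (low : List String) (w : String) (i : Int) :
    i ∈ (posD low).getD w [] ↔ ∃ j, ∃ _ : j < low.length, low[j] = w ∧ i = (j : Int) := by
  have hmap : (PySem.List.enumerate low 0).foldl
      (fun d p => d.modify p.2 [] (fun l => l ++ [p.1])) (PySem.Dict.empty : PySem.Dict String (List Int))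
      = ((PySem.List.enumerate low 0).map (fun p => (p.2, p.1))).foldl
        (fun d q => d.modify q.1 [] (fun l => l ++ [q.2])) PySem.Dict.empty := by
    rw [List.foldl_map]
  rw [posD, hmap, PySem.Dict.getD_foldl_modify_append]
  simp only [PySem.Dict.getD_empty, List.nil_append, List.filter_map, List.map_map,
    List.mem_map, List.mem_filter, Function.comp]
  constructor
  · rintro ⟨p, ⟨hp, hw⟩, rfl⟩
    obtain ⟨j, hj, rfl⟩ := (PySem.List.mem_enumerate_iff low 0 p).1 hp
    exact ⟨j, hj, by simpa using hw, by simp⟩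
  · rintro ⟨j, hj, hw, rfl⟩
    refine ⟨((j : Int), low[j]), ⟨?_, by simpa using hw⟩, rfl⟩
    exact (PySem.List.mem_enumerate_iff low 0 _).2 ⟨j, hj, by simp⟩

def CB (low : List String) (term : String) (k : Int) : Prop :=
  ∃ w rest, PySem.Str.split₀ term = w :: rest ∧
    ∃ i ∈ (posD low).getD w [],
      (i + ((w :: rest).length : Int) ≤ (low.length : Int) ∧
        PySem.List.slice low (some i) (some (i + ((w :: rest).length : Int))) = w :: rest) ∧
      k ∈ PySem.List.pyRange i (i + ((w :: rest).length : Int))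

set_option maxHeartbeats 1000000 in
theorem mem_stepB (low : List String) (s : PySem.Set Int) (t : String) (k : Int) :
    k ∈ stepB low s t ↔ k ∈ s ∨ CB low t k := by
  unfold stepB CB
  rcases hsp : PySem.Str.split₀ t with _ | ⟨w, rest⟩
  · simp
  · simp only
    rw [mem_foldl_step _ _ (fun i k =>
      ((i + ((w :: rest).length : Int) ≤ (low.length : Int) ∧
        PySem.List.slice low (some i) (some (i + ((w :: rest).length : Int))) = w :: rest) ∧
        k ∈ PySem.List.pyRange i (i + ((w :: rest).length : Int))))
      (by
        intro s i k
        by_cases hq : i + ((w :: rest).length : Int) ≤ (low.length : Int) ∧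
            PySem.List.slice low (some i) (some (i + ((w :: rest).length : Int))) = w :: rest
        · rw [if_pos hq, PySem.Set.mem_update]
          constructor
          · rintro (hs | hr)
            exacts [Or.inl hs, Or.inr ⟨hq, hr⟩]
          · rintro (hs | ⟨_, hr⟩)
            exacts [Or.inl hs, Or.inr hr]
        · rw [if_neg hq]
          constructor
          · exact Or.inl
          · rintro (hs | ⟨hq', _⟩)
            exacts [hs, absurd hq' hq])]
    constructor
    · rintro (hs | ⟨i, hi, hc⟩)
      · exact Or.inl hs
      · exact Or.inr ⟨w, rest, rfl, i, hi, hc⟩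
    · rintro (hs | ⟨w', rest', heq, i, hi, hc⟩)
      · exact Or.inl hs
      · cases heq
        exact Or.inr ⟨i, hi, hc⟩

theorem mem_coveredSet (low terms : List String) (k : Int) :
    k ∈ coveredSet low terms ↔ ∃ t ∈ terms, CB low t k := by
  rw [coveredSet, mem_foldl_step _ _ (CB low) (mem_stepB low)]
  simp

theorem getElem_of_take_drop_cons (low : List String) (i : Nat) (w : String) (rest : List String)
    (L : Nat) (h : (low.drop i).take L = w :: rest) (hi : i < low.length) : low[i] = w := by
  have h0 : (low.drop i).head? = some w := by
    cases hdl : low.drop i with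
    | nil => rw [hdl] at h; simp at h
    | cons a tl =>
      cases L with
      | zero => rw [hdl] at h; simp at h
      | succ L =>
        rw [hdl, List.take_succ_cons] at h
        rw [List.head?_cons]
        exact congrArg some (List.cons.inj h).1
  rw [List.head?_drop, List.getElem?_eq_getElem hi] at h0
  exact Option.some.inj h0

theorem coveredSet_iff_hit (low terms : List String) (k : Nat) :
    ((k : Int) ∈ coveredSet low (PySem.Set.ofList (terms.map PySem.Str.lower))) ↔
      hit low terms k = true := by
  rw [mem_coveredSet]
  simp only [PySem.Set.mem_ofList, List.mem_map]
  simp only [hit, List.any_eq_true, Bool.and_eq_true, decide_eq_true_eq, List.mem_range, PA]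
  constructor
  · rintro ⟨nt, ⟨t, ht, rfl⟩, w, rest, hsp, i, hi, ⟨hle, hsl⟩, hk⟩
    obtain ⟨j, hj, hjw, rfl⟩ := (mem_posD low w i).1 hi
    rw [PySem.List.slice_natCast_add] at hsl
    rw [PySem.List.mem_pyRange_one] at hk
    refine ⟨t, ht, j, hj, ⟨⟨⟨by rw [hsp]; omega, by rw [hsp]; exact hsl⟩, by omega⟩,
      by rw [hsp]; omega⟩⟩
  · rintro ⟨t, ht, j, hj, ⟨⟨hle, htake⟩, h1⟩, h2⟩
    rcases hsp : PySem.Str.split₀ (PySem.Str.lower t) with _ | ⟨w, rest⟩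
    · rw [hsp] at h2; simp at h2; omega
    · rw [hsp] at hle htake h2
      refine ⟨PySem.Str.lower t, ⟨t, ht, rfl⟩, w, rest, hsp, (j : Int), (mem_posD low w _).2
        ⟨j, hj, getElem_of_take_drop_cons low j w rest _ htake hj, rfl⟩, ⟨?_, ?_⟩, ?_⟩
      · omega
      · rw [PySem.List.slice_natCast_add]; exact htake
      · rw [PySem.List.mem_pyRange_one]; omega

theorem label_tokens_alt_length (tokens terms : List String) :
    (label_tokens_alt tokens terms).length = tokens.length := by
  rw [alt_eq]
  simp [PySem.List.length_pyRange_one]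

theorem label_tokens_alt_getElem? (tokens terms : List String) (k : Nat) (hk : k < tokens.length) :
    (label_tokens_alt tokens terms)[k]? =
      if hit (tokens.map PySem.Str.lower) terms k then some 1 else some 0 := by
  rw [alt_eq, PySem.List.pyRange_zero_nat, List.map_map]
  rw [List.getElem?_map, List.getElem?_range (by simpa using hk)]
  simp only [Option.map_some, Function.comp]
  by_cases h : hit (tokens.map PySem.Str.lower) terms k = true
  · rw [if_pos h, if_pos ((coveredSet_iff_hit _ terms k).2 h)]
  · rw [if_neg h, if_neg (fun hc => h ((coveredSet_iff_hit _ terms k).1 hc))]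

-- ===== VERDICT (by name: the statement is the Claim_ definition above) =====
theorem label_tokens_spec : Claim_equal_label_tokens := by
  intro tokens terms _
  unfold Spec_label_tokens
  apply List.ext_getElem?
  intro k
  by_cases hk : k < tokens.length
  · rw [label_tokens_getElem? tokens terms k hk, label_tokens_alt_getElem? tokens terms k hk]
  · rw [List.getElem?_eq_none_iff.2 (by rw [label_tokens_length]; omega),
        List.getElem?_eq_none_iff.2 (by rw [label_tokens_alt_length]; omega)]
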